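-- pv_equiv track=rewrite | github.com/susan-meng/operator-hub | tests/testcases/data-agent/api/test_agent_app.py | _get_available_agent
-- ===== SOURCE A (Python) =====
-- def _get_available_agent(AgentImport, preferred_agent_name=None):
--     """
--     获取可用的智能体
--     :param AgentImport: 导入的智能体列表
--     :param preferred_agent_name: 首选的智能体名称，如果提供则优先使用该智能体
--     :return: 可用的智能体信息，如果没有可用智能体则返回 None
--     """
--     if not AgentImport:
--         return None
--
--     # 如果指定了首选智能体名称，优先查找该智能体
--     if preferred_agent_name:
--         for agent_info in AgentImport:
--             if (not agent_info["agent_id"].startswith("CONFLICT_") and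
--                 preferred_agent_name in agent_info["agent_name"]):
--                 return agent_info
--
--     # 如果没有找到首选智能体，则使用第一个可用的智能体
--     for agent_info in AgentImport:
--         if not agent_info["agent_id"].startswith("CONFLICT_"):
--             return agent_info
--
--     return None
-- ===== SOURCE B (Python) =====
-- def _get_available_agent(AgentImport, preferred_agent_name=None):
--     fallback = None
--     for agent_info in AgentImport:
--         if agent_info["agent_id"].startswith("CONFLICT_"):
--             continue
--         if not preferred_agent_name or preferred_agent_name in agent_info["agent_name"]:
--             return agent_info
--         if fallback is None:
--             fallback = agent_info
--     return fallback
-- ===== Notes on version B (the rewrite author's own statement) =====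
-- stated objective: simpler
-- what changed: A's two sequential scans (preferred-match pass, then first-non-conflict pass) are fused into one pass that returns a hit immediately and carries the first non-conflict agent as a fallback.
import Mathlib
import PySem

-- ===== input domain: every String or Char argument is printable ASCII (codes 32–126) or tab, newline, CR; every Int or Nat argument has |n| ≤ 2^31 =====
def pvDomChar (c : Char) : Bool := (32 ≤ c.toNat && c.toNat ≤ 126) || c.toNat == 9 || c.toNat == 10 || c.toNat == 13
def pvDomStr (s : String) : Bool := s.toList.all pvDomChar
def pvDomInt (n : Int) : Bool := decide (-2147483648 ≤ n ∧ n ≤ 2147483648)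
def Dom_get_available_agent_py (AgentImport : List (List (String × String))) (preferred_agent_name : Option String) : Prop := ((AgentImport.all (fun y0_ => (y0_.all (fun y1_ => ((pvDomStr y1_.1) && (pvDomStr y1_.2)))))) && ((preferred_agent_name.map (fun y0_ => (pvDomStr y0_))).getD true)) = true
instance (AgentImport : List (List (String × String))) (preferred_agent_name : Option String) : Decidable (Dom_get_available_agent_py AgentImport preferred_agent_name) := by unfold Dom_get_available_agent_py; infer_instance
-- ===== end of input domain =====

-- B replaces A's two sequential scans by a single pass carrying the first non-conflict agent as a fallback (objective: simpler, one traversal).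

-- Python truthiness of an Optional[str]
def pvTruthy (p : Option String) : Bool :=
  match p with
  | none => false
  | some s => s ≠ ""

-- dict[str, str] lookup d[k] (inputs admitted by Pre_ always carry the key)
def pvGet (d : List (String × String)) (k : String) : String :=
  (PySem.Dict.mk d).getD k ""

-- ===== PORT A =====
-- first loop of A: first non-conflict agent whose name contains p
def pvLoop1 (p : String) : List (List (String × String)) → Option (List (String × String))
  | [] => none
  | d :: rest =>
    if !(PySem.Str.startswith (pvGet d "agent_id") "CONFLICT_")
        && PySem.Str.isIn p (pvGet d "agent_name") then some d
    else pvLoop1 p rest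

-- second loop of A: first non-conflict agent
def pvLoop2 : List (List (String × String)) → Option (List (String × String))
  | [] => none
  | d :: rest =>
    if !(PySem.Str.startswith (pvGet d "agent_id") "CONFLICT_") then some d
    else pvLoop2 rest

def get_available_agent_py (AgentImport : List (List (String × String))) (preferred_agent_name : Option String) : Option (List (String × String)) :=
  if AgentImport = [] then none
  else
    match (if pvTruthy preferred_agent_name
           then pvLoop1 (preferred_agent_name.getD "") AgentImport
           else none) with
    | some d => some d
    | none => pvLoop2 AgentImport

-- ===== PORT B =====
-- single pass: return on a (preferred or unconditional) hit, else remember the first non-conflict agent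
def pvLoopB (pref : Option String) (fb : Option (List (String × String))) : List (List (String × String)) → Option (List (String × String))
  | [] => fb
  | d :: rest =>
    if PySem.Str.startswith (pvGet d "agent_id") "CONFLICT_" then pvLoopB pref fb rest
    else if !(pvTruthy pref) || PySem.Str.isIn (pref.getD "") (pvGet d "agent_name") then some d
    else pvLoopB pref (if fb.isNone then some d else fb) rest

def get_available_agent_py_alt (AgentImport : List (List (String × String))) (preferred_agent_name : Option String) : Option (List (String × String)) :=
  pvLoopB preferred_agent_name none AgentImport

-- ===== PRECONDITION & SPEC =====
-- d has key k
def pvHasKey (d : List (String × String)) (k : String) : Bool := (PySem.Dict.mk d).contains k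
-- dict at which A's preferred-name loop raises KeyError when reached
def pvBadT (d : List (String × String)) : Bool :=
  !(pvHasKey d "agent_id")
    || (!(PySem.Str.startswith (pvGet d "agent_id") "CONFLICT_") && !(pvHasKey d "agent_name"))
-- dict at which A's preferred-name loop returns
def pvMatch (p : String) (d : List (String × String)) : Bool :=
  pvHasKey d "agent_id" && !(PySem.Str.startswith (pvGet d "agent_id") "CONFLICT_")
    && pvHasKey d "agent_name" && PySem.Str.isIn p (pvGet d "agent_name")
-- dict at which A's fallback loop returns
def pvAvail (d : List (String × String)) : Bool :=
  pvHasKey d "agent_id" && !(PySem.Str.startswith (pvGet d "agent_id") "CONFLICT_")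

-- Pre_ excludes exactly the inputs on which A raises KeyError: a dict missing a key A reads ("agent_id";
-- "agent_name" too on non-conflict dicts when the preferred name is truthy) that the scan reaches, i.e. that
-- is not preceded by a dict on which A already returns.
def Pre_get_available_agent_py (AgentImport : List (List (String × String))) (preferred_agent_name : Option String) : Prop :=
  if pvTruthy preferred_agent_name then
    ∀ i < AgentImport.length, pvBadT (AgentImport.getD i []) = true →
      ∃ j < i, pvMatch (preferred_agent_name.getD "") (AgentImport.getD j []) = true
  else
    ∀ i < AgentImport.length, pvHasKey (AgentImport.getD i []) "agent_id" = false →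
      ∃ j < i, pvAvail (AgentImport.getD j []) = true
instance (AgentImport : List (List (String × String))) (preferred_agent_name : Option String) : Decidable (Pre_get_available_agent_py AgentImport preferred_agent_name) := by unfold Pre_get_available_agent_py; infer_instance

def pvWitness_get_available_agent_py : (List (List (String × String))) × Option String :=
  ([[("agent_id", "a1"), ("agent_name", "alpha")], [("agent_id", "CONFLICT_b"), ("agent_name", "beta")]], some "alpha")

def Spec_get_available_agent_py (AgentImport : List (List (String × String))) (preferred_agent_name : Option String) (out : Option (List (String × String))) : Prop := out = get_available_agent_py_alt AgentImport preferred_agent_name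
instance (AgentImport : List (List (String × String))) (preferred_agent_name : Option String) (out : Option (List (String × String))) : Decidable (Spec_get_available_agent_py AgentImport preferred_agent_name out) := by unfold Spec_get_available_agent_py; infer_instance

-- ===== CLAIM (what is proved, stated in full; the proofs are below) =====
def Claim_equal_get_available_agent_py : Prop := ∀ (AgentImport : List (List (String × String))) (preferred_agent_name : Option String), Dom_get_available_agent_py AgentImport preferred_agent_name → Pre_get_available_agent_py AgentImport preferred_agent_name → Spec_get_available_agent_py AgentImport preferred_agent_name (get_available_agent_py AgentImport preferred_agent_name)

-- ===== LEMMAS AND PROOFS =====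

-- with a truthy preferred name, the single pass equals "loop1, else fallback, else loop2"
theorem pvLoopB_truthy (p : String) (hp : pvTruthy (some p) = true)
    (l : List (List (String × String))) :
    ∀ fb, pvLoopB (some p) fb l = (pvLoop1 p l).or (fb.or (pvLoop2 l)) := by
  induction l with
  | nil => intro fb; cases fb <;> rfl
  | cons d rest ih =>
    intro fb
    cases hc : PySem.Str.startswith (pvGet d "agent_id") "CONFLICT_" with
    | true =>
      simp only [pvLoopB, pvLoop1, pvLoop2, hc, hp, Option.getD_some]
      simp [ih]
    | false =>
      cases hi : PySem.Str.isIn p (pvGet d "agent_name") with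
      | true =>
        simp only [pvLoopB, pvLoop1, pvLoop2, hc, hi, hp, Option.getD_some]
        simp
      | false =>
        simp only [pvLoopB, pvLoop1, pvLoop2, hc, hi, hp, Option.getD_some]
        simp only [Bool.not_true, Bool.false_or, Bool.not_false, Bool.true_and,
          Bool.false_eq_true, if_false, if_true, ih]
        cases fb <;> simp

-- with a falsy preferred name, the single pass returns the first non-conflict agent, else the fallback
theorem pvLoopB_falsy (pref : Option String) (hp : pvTruthy pref = false)
    (l : List (List (String × String))) :
    ∀ fb, pvLoopB pref fb l = (pvLoop2 l).or fb := by
  induction l with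
  | nil => intro fb; cases fb <;> rfl
  | cons d rest ih =>
    intro fb
    cases hc : PySem.Str.startswith (pvGet d "agent_id") "CONFLICT_" with
    | true =>
      simp only [pvLoopB, pvLoop2, hc, hp]
      simp [ih]
    | false =>
      simp only [pvLoopB, pvLoop2, hc, hp]
      simp

-- ===== VERDICT (by name: the statement is the Claim_ definition above) =====
theorem get_available_agent_py_spec : Claim_equal_get_available_agent_py := by
  intro AI pref _ _
  unfold Spec_get_available_agent_py get_available_agent_py get_available_agent_py_alt
  cases AI with
  | nil => cases pref <;> rfl
  | cons d rest =>
    by_cases hp : pvTruthy pref = true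
    · obtain ⟨p, rfl⟩ : ∃ p, pref = some p := by
        cases pref with
        | none => simp [pvTruthy] at hp
        | some p => exact ⟨p, rfl⟩
      rw [pvLoopB_truthy p hp]
      simp only [hp, if_true, Option.getD_some, Option.none_or]
      cases pvLoop1 p (d :: rest) <;> simp
    · rw [pvLoopB_falsy pref (by simpa using hp)]
      simp only [Bool.not_eq_true] at hp
      simp [hp]
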